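-- pv_equiv track=rewrite | github.com/EngineerCoding/BPGEPR-07-2016-2017 | protein_reaction.py | search_reaction_nr
-- ===== SOURCE A (Python) =====
-- def search_reaction_nr(html_text):
--     """ This function actually searches for the reaction number and
--     collects them.
--
--     Parameters:
--         html_text - string. The text of the HTML file which contains
--         Rcodes.
--     Returns:
--         A list of reaction numbers which can be used in the KEGG API.
--     """
--     tag = False
--     collection = ""
--     all_reactions = []
--     reaction_nr = ""
--     for char in html_text:
--         if char == '>' and not tag:
--             collection = ""
--         else:
--             collection += char
--         if collection == 'R' and not tag:
--             tag = True
--         tag, reaction_nr, all_reactions = tag_reaction_nr(char, tag,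
--                                                           all_reactions,
--                                                           reaction_nr)
--     return all_reactions
--
-- def tag_reaction_nr(char, tag, all_reactions, reaction_nr):
--     """ Whenever a specific part in the html code is tagged
--     (tag = True), add all of the following characters (char) to the
--     string reaction_nr.
--
--     Parameters:
--         tag - boolean. Indicates when text is tagged.
--         char - string. Character in text.
--         reaction_nr - string. Contains the reaction number.
--         all_reactions - list. Contains all reaction numbers.
--     Returns:
--         tag - boolean.
--         reaction_nr - string.
--         all_reactions - list.
--     """
--     if tag:
--         if char != "<":
--             reaction_nr += char
--         else:
--             all_reactions.append(reaction_nr)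
--             reaction_nr = ""
--             tag = False
--     return tag, reaction_nr, all_reactions
-- ===== SOURCE B (Python) =====
-- def search_reaction_nr(html_text):
--     """Single pass: an 'armed' flag (start of text or just after '>') plus
--     find('<') to grab each reaction number slice, instead of growing buffers."""
--     all_reactions = []
--     armed = True  # start of text behaves like the position right after a '>'
--     i = 0
--     n = len(html_text)
--     while i < n:
--         c = html_text[i]
--         if armed and c == 'R':
--             j = html_text.find('<', i)
--             if j == -1:
--                 break
--             all_reactions.append(html_text[i:j])
--             i = j + 1
--             armed = False
--         else:
--             armed = (c == '>')
--             i += 1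
--     return all_reactions
-- ===== Notes on version B (the rewrite author's own statement) =====
-- stated objective: faster
-- what changed: Replaces A's per-character growing string buffers (collection/reaction_nr rebuilt by += and threaded through a helper) with a single-pass scan that keeps one boolean armed flag and slices each reaction number out via str.find.
import Mathlib
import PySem

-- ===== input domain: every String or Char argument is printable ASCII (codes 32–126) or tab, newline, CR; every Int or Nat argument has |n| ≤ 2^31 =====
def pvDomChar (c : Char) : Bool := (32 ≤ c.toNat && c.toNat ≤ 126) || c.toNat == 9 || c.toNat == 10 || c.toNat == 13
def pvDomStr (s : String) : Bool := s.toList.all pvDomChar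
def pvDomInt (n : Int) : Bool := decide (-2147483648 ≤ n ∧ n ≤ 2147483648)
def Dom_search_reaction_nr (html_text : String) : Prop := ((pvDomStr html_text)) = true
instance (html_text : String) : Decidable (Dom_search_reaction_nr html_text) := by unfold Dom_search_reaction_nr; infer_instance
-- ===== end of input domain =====

-- ===== PORT A =====
-- B changes: a single-pass scan with one boolean armed flag and a find/slice per reaction, instead of A's growing string buffers (objective: faster).
-- port of tag_reaction_nr (strings carried as List Char; String.mk at append, exact on the domain)
def tag_reaction_nr (char : Char) (tag : Bool) (all_reactions : List String) (reaction_nr : List Char) :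
    Bool × List Char × List String :=
  if tag then
    if char ≠ '<' then (tag, reaction_nr ++ [char], all_reactions)
    else (false, [], all_reactions ++ [String.mk reaction_nr])
  else (tag, reaction_nr, all_reactions)

-- one iteration of A's for-loop; state = (tag, collection, all_reactions, reaction_nr)
def stepA (st : Bool × List Char × List String × List Char) (char : Char) :
    Bool × List Char × List String × List Char :=
  match st with
  | (tag, collection, all_reactions, reaction_nr) =>
    let collection := if char = '>' ∧ tag = false then [] else collection ++ [char]
    let tag := if collection = ['R'] ∧ tag = false then true else tag
    match tag_reaction_nr char tag all_reactions reaction_nr with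
    | (tag, reaction_nr, all_reactions) => (tag, collection, all_reactions, reaction_nr)

def search_reaction_nr (html_text : String) : List String :=
  (html_text.toList.foldl stepA (false, [], [], [])).2.2.1

-- ===== PORT B =====
-- B's while-loop: armed says the previous char was a right angle bracket (or we are at the start);
-- the find from position i and the slice html_text[i:j] become dropWhile / takeWhile on the remaining chars.
def goB (armed : Bool) (cs : List Char) : List String :=
  match cs with
  | [] => []
  | c :: rest =>
    if armed = true ∧ c = 'R' then
      match h : rest.dropWhile (· ≠ '<') with
      | [] => []   -- find returned -1: unterminated, stop
      | _ :: rest' => String.mk (c :: rest.takeWhile (· ≠ '<')) :: goB false rest'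
    else goB (c = '>') rest
termination_by cs.length
decreasing_by
  · have h1 : (rest.dropWhile (· ≠ '<')).length ≤ rest.length :=
      (List.dropWhile_sublist _).length_le
    rw [h] at h1
    simp at h1
    simp
    omega
  · simp

def search_reaction_nr_alt (html_text : String) : List String :=
  goB true html_text.toList

-- ===== PRECONDITION & SPEC =====
def Spec_search_reaction_nr (html_text : String) (out : List String) : Prop := out = search_reaction_nr_alt html_text
instance (html_text : String) (out : List String) : Decidable (Spec_search_reaction_nr html_text out) := by unfold Spec_search_reaction_nr; infer_instance

-- ===== CLAIM (what is proved, stated in full; the proofs are below) =====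
def Claim_equal_search_reaction_nr : Prop := ∀ (html_text : String), Dom_search_reaction_nr html_text → Spec_search_reaction_nr html_text (search_reaction_nr html_text)

-- ===== LEMMAS AND PROOFS =====

-- unfolding lemmas for B's loop
theorem goB_skip (armed : Bool) (c : Char) (cs : List Char) (h : ¬(armed = true ∧ c = 'R')) :
    goB armed (c :: cs) = goB (c = '>') cs := by
  rw [goB.eq_def]; simp [h]

theorem goB_capture_nil (cs : List Char) (h : cs.dropWhile (· ≠ '<') = []) :
    goB true ('R' :: cs) = [] := by
  rw [goB.eq_def]
  simp
  split
  · rfl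
  next heq => rw [h] at heq; cases heq

theorem goB_capture_cons (cs : List Char) (x : Char) (rest : List Char)
    (h : cs.dropWhile (· ≠ '<') = x :: rest) :
    goB true ('R' :: cs) = String.mk ('R' :: cs.takeWhile (· ≠ '<')) :: goB false rest := by
  rw [goB.eq_def]
  simp
  split
  · next heq => rw [h] at heq; cases heq
  · next heq =>
      rw [h] at heq
      injection heq with h1 h2
      rw [h2]

-- While tag is set, A keeps appending to reaction_nr until the first '<' (if any),
-- where it emits the collected reaction number and drops back to the untagged state.
theorem foldA_inside (cs : List Char) : ∀ (col : List Char) (acc : List String) (rnr : List Char),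
    (List.foldl stepA (true, col, acc, rnr) cs).2.2.1 =
      (if (cs.dropWhile (· ≠ '<')) = [] then acc else
        (List.foldl stepA (false, col ++ cs.takeWhile (· ≠ '<') ++ ['<'],
          acc ++ [String.mk (rnr ++ cs.takeWhile (· ≠ '<'))], [])
          ((cs.dropWhile (· ≠ '<')).tail)).2.2.1) := by
  induction cs with
  | nil => intro col acc rnr; simp
  | cons c cs ih =>
    intro col acc rnr
    by_cases hc : c = '<'
    · subst hc
      simp [List.foldl_cons, stepA, tag_reaction_nr]
    · simp only [List.foldl_cons, stepA, tag_reaction_nr, hc, and_false, Bool.true_eq_false,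
        if_false, ne_eq, not_false_iff, if_true]
      rw [ih]
      simp [List.takeWhile_cons, hc, List.append_assoc]

-- In the untagged state (reaction_nr empty, collection ≠ "R"), A's remaining output
-- is exactly B's scan, with B's armed flag ⟺ collection is empty.
theorem foldA_outside : ∀ (n : Nat) (cs : List Char), cs.length ≤ n →
    ∀ (col : List Char) (acc : List String), col ≠ ['R'] →
    (List.foldl stepA (false, col, acc, []) cs).2.2.1 = acc ++ goB col.isEmpty cs := by
  intro n
  induction n with
  | zero =>
    intro cs hlen col acc _
    have : cs = [] := List.length_eq_zero_iff.mp (Nat.le_zero.mp hlen)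
    subst this; simp [goB]
  | succ n ih =>
    intro cs hlen col acc hcol
    cases cs with
    | nil => simp [goB]
    | cons c cs =>
      have hlen' : cs.length ≤ n := by simpa using hlen
      by_cases harm : col = []
      · subst harm
        by_cases hcR : c = 'R'
        · subst hcR
          -- trigger: tag becomes true, reaction_nr starts with 'R'
          have e1 : ¬ ('R' : Char) = '>' := by decide
          have e2 : ¬ ('R' : Char) = '<' := by decide
          simp [List.foldl_cons, stepA, tag_reaction_nr, e1, e2]
          cases hxr : cs.dropWhile (· ≠ '<') with
          | nil => rw [foldA_inside, goB_capture_nil cs hxr, if_pos hxr]; simp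
          | cons x rest =>
            have hrest : rest.length ≤ n := by
              have h1 : (cs.dropWhile (· ≠ '<')).length ≤ cs.length :=
                (List.dropWhile_sublist _).length_le
              rw [hxr] at h1
              simp at h1
              omega
            rw [foldA_inside, goB_capture_cons cs x rest hxr, hxr]
            rw [if_neg (by simp)]
            simp only [List.tail_cons]
            rw [ih rest hrest _ _ (by simp)]
            simp [List.append_assoc]
        · by_cases hgt : c = '>'
          · subst hgt
            simp [List.foldl_cons, stepA, tag_reaction_nr]
            rw [ih cs hlen' [] acc (by simp)]
            rw [goB_skip _ _ _ (by simp [hcR])]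
            simp
          · simp [List.foldl_cons, stepA, tag_reaction_nr, hgt, hcR]
            rw [ih cs hlen' [c] acc (by simp [hcR])]
            rw [goB_skip _ _ _ (by simp [hcR])]
            simp [hgt]
      · by_cases hgt : c = '>'
        · subst hgt
          have e3 : ¬ (('>') : Char) = '<' := by decide
          simp [List.foldl_cons, stepA, tag_reaction_nr, e3]
          rw [ih cs hlen' [] acc (by simp)]
          rw [goB_skip _ _ _ (by simp [harm])]
          simp
        · have hne : col ++ [c] ≠ ['R'] := by
            cases col with
            | nil => exact absurd rfl harm
            | cons a as => simp
          simp [List.foldl_cons, stepA, tag_reaction_nr, hgt, hne]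
          rw [ih cs hlen' (col ++ [c]) acc hne]
          rw [goB_skip _ _ _ (by simp [harm])]
          have hie : (col ++ [c]).isEmpty = false := by cases col <;> rfl
          rw [hie]
          simp [hgt]

-- ===== VERDICT (by name: the statement is the Claim_ definition above) =====
theorem search_reaction_nr_spec : Claim_equal_search_reaction_nr := by
  intro s _
  unfold Spec_search_reaction_nr search_reaction_nr search_reaction_nr_alt
  rw [foldA_outside s.toList.length s.toList le_rfl [] [] (by simp)]
  simp
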